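-- pv_equiv track=rewrite | github.com/mitch-n/personal_projects | password/password_utils.py | word_scramble
-- ===== SOURCE A (Python) =====
-- def word_scramble(word, key):
--     new_word=''
--     for letter in word:
--         c=ord(letter)
--         for i in range(key):
--             if c in range(91,97):
--                 c=97
--             if c<122:
--                 c+=1
--             else:
--                 c=65
--         new_word+=chr(c)
--     return new_word
-- ===== SOURCE B (Python) =====
-- # Faster exact re-implementation: advance each char only until it enters the
-- # cipher's 52-long cycle ({65..91} U {98..122}), then jump ahead by key mod 52.
-- def _step(c):
--     if 91 <= c <= 96:
--         return 98
--     return c + 1 if c < 122 else 65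
--
--
-- def _in_cycle(c):
--     return 65 <= c <= 91 or 98 <= c <= 122
--
--
-- def word_scramble(word, key):
--     out = []
--     for letter in word:
--         c = ord(letter)
--         k = key
--         while k > 0 and not _in_cycle(c):
--             c = _step(c)
--             k -= 1
--         if k > 0:
--             for _ in range(k % 52):
--                 c = _step(c)
--         out.append(chr(c))
--     return ''.join(out)
-- ===== Notes on version B (the rewrite author's own statement) =====
-- stated objective: faster
-- what changed: Instead of applying the two-branch shift step key times per character, B advances each character only until it enters the cipher's 52-element cycle ({65..91} U {98..122}) and then applies key mod 52 remaining steps, so the per-character work is bounded by a constant.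
import Mathlib
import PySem

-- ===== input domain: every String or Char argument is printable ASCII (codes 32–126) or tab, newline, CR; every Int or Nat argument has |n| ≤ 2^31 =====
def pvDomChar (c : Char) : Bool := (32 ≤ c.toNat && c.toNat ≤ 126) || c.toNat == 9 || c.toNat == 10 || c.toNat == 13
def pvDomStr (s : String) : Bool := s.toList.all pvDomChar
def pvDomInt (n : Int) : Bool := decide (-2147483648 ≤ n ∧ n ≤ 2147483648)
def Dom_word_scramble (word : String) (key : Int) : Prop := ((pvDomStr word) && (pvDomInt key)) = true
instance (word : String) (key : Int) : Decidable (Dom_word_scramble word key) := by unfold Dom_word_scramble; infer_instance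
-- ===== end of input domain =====

-- B changes the algorithm: per character it only advances to the step function's 52-cycle and jumps key mod 52 steps, instead of A's key iterations (faster).
-- ord/chr are ported by hand: ord(letter) = (letter.toNat : Int), chr(c) = Char.ofNat c.toNat — exact here since every produced code stays in 0..0x10FFFF on Dom.

-- ===== PORT A =====
-- the body of A's inner loop: `if c in range(91,97): c=97` then `if c<122: c+=1 else: c=65`
def pvStepA (c : Int) : Int :=
  let c := if 91 ≤ c ∧ c < 97 then 97 else c
  if c < 122 then c + 1 else 65

-- `for i in range(key)` : run the body key times (0 times for key ≤ 0, via Int.toNat)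
def pvInnerA : Nat → Int → Int
  | 0, c => c
  | n + 1, c => pvInnerA n (pvStepA c)

def word_scramble (word : String) (key : Int) : String :=
  String.mk (word.toList.foldl
    (fun acc letter => acc ++ [Char.ofNat (pvInnerA key.toNat (letter.toNat : Int)).toNat]) [])

-- ===== PORT B =====
def pvStepB (c : Int) : Int :=
  if 91 ≤ c ∧ c ≤ 96 then 98
  else if c < 122 then c + 1 else 65

def pvInCycle (c : Int) : Bool :=
  decide ((65 ≤ c ∧ c ≤ 91) ∨ (98 ≤ c ∧ c ≤ 122))

-- Source B's `while k > 0 and not _in_cycle(c)` loop; fuel-bounded (the loop exits within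
-- 60 iterations for every character admitted by Dom, proved below)
def pvPreB : Nat → Int → Int → Int × Int
  | 0, c, k => (c, k)
  | fuel + 1, c, k =>
    if 0 < k ∧ pvInCycle c = false then pvPreB fuel (pvStepB c) (k - 1) else (c, k)

-- Source B's `for _ in range(k % 52)` loop
def pvJump : Nat → Int → Int
  | 0, c => c
  | n + 1, c => pvJump n (pvStepB c)

def pvPerCharB (c k : Int) : Int :=
  let r := pvPreB 60 c k
  if 0 < r.2 then pvJump (PySem.Int.mod r.2 52).toNat r.1 else r.1

def word_scramble_alt (word : String) (key : Int) : String :=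
  String.mk (word.toList.map (fun letter => Char.ofNat (pvPerCharB (letter.toNat : Int) key).toNat))

-- ===== PRECONDITION & SPEC =====
def Spec_word_scramble (word : String) (key : Int) (out : String) : Prop := out = word_scramble_alt word key
instance (word : String) (key : Int) (out : String) : Decidable (Spec_word_scramble word key out) := by unfold Spec_word_scramble; infer_instance

-- ===== CLAIM (what is proved, stated in full; the proofs are below) =====
def Claim_equal_word_scramble : Prop := ∀ (word : String) (key : Int), Dom_word_scramble word key → Spec_word_scramble word key (word_scramble word key)

-- ===== LEMMAS AND PROOFS =====

lemma pvStepB_eq (c : Int) : pvStepB c = pvStepA c := by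
  simp only [pvStepA, pvStepB]
  split_ifs <;> omega

lemma pvInnerA_eq_iterate (n : Nat) : ∀ c : Int, pvInnerA n c = pvStepA^[n] c := by
  induction n with
  | zero => intro c; rfl
  | succ n ih =>
    intro c
    rw [pvInnerA, ih, ← Function.iterate_succ_apply]

lemma pvJump_eq_iterate (n : Nat) : ∀ c : Int, pvJump n c = pvStepA^[n] c := by
  induction n with
  | zero => intro c; rfl
  | succ n ih =>
    intro c
    rw [pvJump, ih, pvStepB_eq, ← Function.iterate_succ_apply]

-- the 52-element cycle of the step function
set_option maxRecDepth 8000 in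
lemma pvCycle52 (c : Int) (h : pvInCycle c = true) : pvStepA^[52] c = c := by
  simp only [pvInCycle, decide_eq_true_eq] at h
  have h1 : 65 ≤ c := by omega
  have h2 : c ≤ 122 := by omega
  interval_cases c <;> revert h <;> decide

lemma pvIterate_mod (c : Int) (h : pvInCycle c = true) (n : Nat) :
    pvStepA^[n] c = pvStepA^[n % 52] c := by
  induction n using Nat.strong_induction_on with
  | _ n ih =>
    by_cases hn : n < 52
    · rw [Nat.mod_eq_of_lt hn]
    · have h52 : n = (n - 52) + 52 := by omega
      rw [h52, Function.iterate_add_apply, pvCycle52 c h, ih (n - 52) (by omega)]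
      congr 1
      omega

lemma pvPreB_spec : ∀ (fuel : Nat) (c k : Int), 9 ≤ c →
    ((65 - c).toNat + 1 ≤ fuel ∨ pvInCycle c = true) →
    pvStepA^[(pvPreB fuel c k).2.toNat] (pvPreB fuel c k).1 = pvStepA^[k.toNat] c ∧
      (0 < (pvPreB fuel c k).2 → pvInCycle (pvPreB fuel c k).1 = true) := by
  intro fuel
  induction fuel with
  | zero =>
    intro c k h9 hf
    have hc : pvInCycle c = true := by
      rcases hf with hf | hf
      · omega
      · exact hf
    exact ⟨rfl, fun _ => hc⟩
  | succ fuel ih =>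
    intro c k h9 hf
    by_cases hcond : 0 < k ∧ pvInCycle c = false
    · rw [pvPreB, if_pos hcond]
      have hcyc : pvInCycle c = false := hcond.2
      have hfl : (65 - c).toNat + 1 ≤ fuel + 1 := by
        rcases hf with h | h
        · exact h
        · rw [hcyc] at h; exact absurd h (by simp)
      simp only [pvInCycle, decide_eq_false_iff_not] at hcyc
      push_neg at hcyc
      have h9' : 9 ≤ pvStepB c := by
        simp only [pvStepB]; split_ifs <;> omega
      have hf' : (65 - pvStepB c).toNat + 1 ≤ fuel ∨ pvInCycle (pvStepB c) = true := by
        by_cases hlt : c < 65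
        · left
          simp only [pvStepB]
          split_ifs <;> omega
        · right
          simp only [pvInCycle, decide_eq_true_eq, pvStepB]
          split_ifs <;> omega
      obtain ⟨he, hi⟩ := ih (pvStepB c) (k - 1) h9' hf'
      refine ⟨?_, hi⟩
      rw [he, pvStepB_eq]
      have hk : k.toNat = (k - 1).toNat + 1 := by omega
      rw [hk, Function.iterate_succ_apply]
    · rw [pvPreB, if_neg hcond]
      refine ⟨rfl, fun hk => ?_⟩
      by_contra hnc
      exact hcond ⟨hk, by simpa using hnc⟩

lemma pvPerCharB_eq (c k : Int) (h9 : 9 ≤ c) :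
    pvPerCharB c k = pvStepA^[k.toNat] c := by
  have hf : (65 - c).toNat + 1 ≤ 60 ∨ pvInCycle c = true := by left; omega
  obtain ⟨he, hi⟩ := pvPreB_spec 60 c k h9 hf
  simp only [pvPerCharB]
  by_cases hk : 0 < (pvPreB 60 c k).2
  · rw [if_pos hk, pvJump_eq_iterate]
    have hmod : (PySem.Int.mod (pvPreB 60 c k).2 52).toNat = (pvPreB 60 c k).2.toNat % 52 := by
      rw [PySem.Int.mod_eq_emod_of_pos (by omega)]
      omega
    rw [hmod, ← pvIterate_mod _ (hi hk), he]
  · rw [if_neg hk]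
    have h0 : (pvPreB 60 c k).2.toNat = 0 := by omega
    rw [h0] at he
    exact he

lemma pvFoldl_append (g : Char → Char) :
    ∀ (l acc : List Char), l.foldl (fun acc ch => acc ++ [g ch]) acc = acc ++ l.map g := by
  intro l
  induction l with
  | nil => intro acc; simp
  | cons x xs ih => intro acc; simp [ih]

-- ===== VERDICT (by name: the statement is the Claim_ definition above) =====
theorem word_scramble_spec : Claim_equal_word_scramble := by
  intro word key hdom
  unfold Spec_word_scramble word_scramble word_scramble_alt
  rw [pvFoldl_append]
  simp only [List.nil_append]
  congr 1
  apply List.map_congr_left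
  intro ch hch
  have hdc : pvDomChar ch = true := by
    simp only [Dom_word_scramble, Bool.and_eq_true, pvDomStr, List.all_eq_true] at hdom
    exact hdom.1 ch hch
  have h9 : 9 ≤ (ch.toNat : Int) := by
    simp only [pvDomChar, Bool.or_eq_true, Bool.and_eq_true, decide_eq_true_eq,
      beq_iff_eq] at hdc
    omega
  rw [pvInnerA_eq_iterate, pvPerCharB_eq _ _ h9]
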